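-- pv_equiv track=rewrite | github.com/Prasobgnath/servicenow-monitoring-bot-V2 | utils.py | categorize_tickets
-- ===== SOURCE A (Python) =====
-- def categorize_tickets(ticket_list):
--     """
--     Categorize tickets into high priority, critical, and normal
--
--     Args:
--         ticket_list: list of ticket strings
--
--     Returns:
--         dict - categorized tickets
--     """
--     categorized = {
--         'critical': [],
--         'high': [],
--         'normal': [],
--         'on_hold': [],
--         'assigned': []
--     }
--
--     for ticket in ticket_list:
--         if "1 - Critical" in ticket:
--             categorized['critical'].append(ticket)
--         elif "2 - High" in ticket:
--             categorized['high'].append(ticket)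
--         elif "On Hold" in ticket:
--             categorized['on_hold'].append(ticket)
--         elif "Assigned" in ticket:
--             categorized['assigned'].append(ticket)
--         else:
--             categorized['normal'].append(ticket)
--
--     return categorized
-- ===== SOURCE B (Python) =====
-- RULES = [("1 - Critical", "critical"), ("2 - High", "high"),
--          ("On Hold", "on_hold"), ("Assigned", "assigned")]
--
--
-- def _classify(ticket):
--     for keyword, category in RULES:
--         if keyword in ticket:
--             return category
--     return "normal"
--
--
-- def categorize_tickets(ticket_list):
--     return {category: [t for t in ticket_list if _classify(t) == category]
--             for category in ("critical", "high", "normal", "on_hold", "assigned")}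
-- ===== Notes on version B (the rewrite author's own statement) =====
-- stated objective: alternative
-- what changed: Replaces the hardcoded if-elif chain with a data-driven rules table and a classify helper, and builds the result as per-category filter passes instead of a single loop with in-place appends.
import Mathlib
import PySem

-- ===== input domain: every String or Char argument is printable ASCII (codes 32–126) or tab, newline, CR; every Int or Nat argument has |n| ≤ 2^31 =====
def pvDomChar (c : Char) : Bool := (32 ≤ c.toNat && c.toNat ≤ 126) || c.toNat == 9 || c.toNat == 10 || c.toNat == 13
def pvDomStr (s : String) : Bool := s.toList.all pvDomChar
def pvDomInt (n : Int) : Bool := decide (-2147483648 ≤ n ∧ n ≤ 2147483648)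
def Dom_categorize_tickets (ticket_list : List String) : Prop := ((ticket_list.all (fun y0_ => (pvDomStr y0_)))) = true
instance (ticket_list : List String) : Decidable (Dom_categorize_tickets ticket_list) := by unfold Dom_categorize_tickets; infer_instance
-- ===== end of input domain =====

-- B replaces A's if-elif chain by an ordered rules table with a classify helper and
-- builds each category by a filter pass (alternative decomposition, same cost).

-- ===== PORT A =====
-- loop state: (critical, high, normal, on_hold, assigned); one step = A's if-elif chain
def ctStep (s : List String × List String × List String × List String × List String)
    (t : String) : List String × List String × List String × List String × List String :=
  if PySem.Str.isIn "1 - Critical" t then (s.1 ++ [t], s.2.1, s.2.2.1, s.2.2.2.1, s.2.2.2.2)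
  else if PySem.Str.isIn "2 - High" t then (s.1, s.2.1 ++ [t], s.2.2.1, s.2.2.2.1, s.2.2.2.2)
  else if PySem.Str.isIn "On Hold" t then (s.1, s.2.1, s.2.2.1, s.2.2.2.1 ++ [t], s.2.2.2.2)
  else if PySem.Str.isIn "Assigned" t then (s.1, s.2.1, s.2.2.1, s.2.2.2.1, s.2.2.2.2 ++ [t])
  else (s.1, s.2.1, s.2.2.1 ++ [t], s.2.2.2.1, s.2.2.2.2)

def categorize_tickets (ticket_list : List String) : List (String × List String) :=
  let st := ticket_list.foldl ctStep ([], [], [], [], [])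
  [("critical", st.1), ("high", st.2.1), ("normal", st.2.2.1),
   ("on_hold", st.2.2.2.1), ("assigned", st.2.2.2.2)]

-- ===== PORT B =====
def ctRules : List (String × String) :=
  [("1 - Critical", "critical"), ("2 - High", "high"),
   ("On Hold", "on_hold"), ("Assigned", "assigned")]

def ctClassifyAux : List (String × String) → String → String
  | [], _ => "normal"
  | r :: rs, t => if PySem.Str.isIn r.1 t then r.2 else ctClassifyAux rs t

def ctClassify (t : String) : String := ctClassifyAux ctRules t

def categorize_tickets_alt (ticket_list : List String) : List (String × List String) :=
  ["critical", "high", "normal", "on_hold", "assigned"].map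
    (fun c => (c, ticket_list.filter (fun t => ctClassify t == c)))

-- ===== PRECONDITION & SPEC =====
def Spec_categorize_tickets (ticket_list : List String) (out : List (String × List String)) : Prop :=
  out = categorize_tickets_alt ticket_list
instance (ticket_list : List String) (out : List (String × List String)) : Decidable (Spec_categorize_tickets ticket_list out) := by
  unfold Spec_categorize_tickets; infer_instance

-- ===== CLAIM =====
def Claim_equal_categorize_tickets : Prop :=
  ∀ (ticket_list : List String), Dom_categorize_tickets ticket_list →
    Spec_categorize_tickets ticket_list (categorize_tickets ticket_list)

-- ===== LEMMAS AND PROOFS =====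
lemma ct_loop_eq (ts : List String) (c h n o a : List String) :
    ts.foldl ctStep (c, h, n, o, a)
    = (c ++ ts.filter (fun t => ctClassify t == "critical"),
       h ++ ts.filter (fun t => ctClassify t == "high"),
       n ++ ts.filter (fun t => ctClassify t == "normal"),
       o ++ ts.filter (fun t => ctClassify t == "on_hold"),
       a ++ ts.filter (fun t => ctClassify t == "assigned")) := by
  induction ts generalizing c h n o a with
  | nil => simp
  | cons t ts ih =>
    rw [List.foldl_cons]
    by_cases h1 : PySem.Str.isIn "1 - Critical" t = true
    · have hc : ctClassify t = "critical" := by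
        simp only [ctClassify, ctRules, ctClassifyAux, h1, if_true]
      rw [show ctStep (c, h, n, o, a) t = (c ++ [t], h, n, o, a) by
        simp only [ctStep, h1, if_true], ih]
      simp [hc]
    · rw [Bool.not_eq_true] at h1
      by_cases h2 : PySem.Str.isIn "2 - High" t = true
      · have hc : ctClassify t = "high" := by
          simp only [ctClassify, ctRules, ctClassifyAux, h1, h2, if_true, Bool.false_eq_true,
            if_false]
        rw [show ctStep (c, h, n, o, a) t = (c, h ++ [t], n, o, a) by
          simp only [ctStep, h1, h2, if_true, Bool.false_eq_true, if_false], ih]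
        simp [hc]
      · rw [Bool.not_eq_true] at h2
        by_cases h3 : PySem.Str.isIn "On Hold" t = true
        · have hc : ctClassify t = "on_hold" := by
            simp only [ctClassify, ctRules, ctClassifyAux, h1, h2, h3, if_true,
              Bool.false_eq_true, if_false]
          rw [show ctStep (c, h, n, o, a) t = (c, h, n, o ++ [t], a) by
            simp only [ctStep, h1, h2, h3, if_true, Bool.false_eq_true, if_false], ih]
          simp [hc]
        · rw [Bool.not_eq_true] at h3
          by_cases h4 : PySem.Str.isIn "Assigned" t = true
          · have hc : ctClassify t = "assigned" := by
              simp only [ctClassify, ctRules, ctClassifyAux, h1, h2, h3, h4, if_true,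
                Bool.false_eq_true, if_false]
            rw [show ctStep (c, h, n, o, a) t = (c, h, n, o, a ++ [t]) by
              simp only [ctStep, h1, h2, h3, h4, if_true, Bool.false_eq_true, if_false], ih]
            simp [hc]
          · rw [Bool.not_eq_true] at h4
            have hc : ctClassify t = "normal" := by
              simp only [ctClassify, ctRules, ctClassifyAux, h1, h2, h3, h4,
                Bool.false_eq_true, if_false]
            rw [show ctStep (c, h, n, o, a) t = (c, h, n ++ [t], o, a) by
              simp only [ctStep, h1, h2, h3, h4, Bool.false_eq_true, if_false], ih]
            simp [hc]

-- ===== VERDICT =====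
theorem categorize_tickets_spec : Claim_equal_categorize_tickets := by
  intro ts _
  show categorize_tickets ts = categorize_tickets_alt ts
  simp only [categorize_tickets, categorize_tickets_alt, ct_loop_eq, List.map,
    List.nil_append]
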